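-- pv_equiv track=rewrite | github.com/ronGeva/algorithms | cracking_the_coding_interview/ex_17_18.py | build_next_character_array
-- ===== SOURCE A (Python) =====
-- def build_next_character_array(item, arr):
--     """
--     Constructs an array in which the value at index i represents the first index bigger/equal to i in which the
--     item can be found.
--     :param item: The item to which the returned array references.
--     :param arr: An array of of values, some of which may be item.
--     :return: An array.
--     """
--     next_index = None
--     result_arr = [None for _ in range(len(arr))]
--     for i in range(len(arr) - 1, -1, -1):
--         if arr[i] == item:
--             next_index = i
--         result_arr[i] = next_index
--     return result_arr
-- ===== SOURCE B (Python) =====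
-- def build_next_character_array(item, arr):
--     """Single forward pass: emit the answer in blocks — positions waiting for the
--     next occurrence of `item` all receive that occurrence's index at once."""
--     result = []
--     pending = 0
--     for j, v in enumerate(arr):
--         pending += 1
--         if v == item:
--             result.extend([j] * pending)
--             pending = 0
--     result.extend([None] * pending)
--     return result
-- ===== Notes on version B (the rewrite author's own statement) =====
-- stated objective: alternative
-- what changed: A preallocates a None-filled result and sweeps the array backwards carrying the next occurrence index; B makes a single forward pass that appends the answer in blocks, flushing all positions waiting for the next occurrence as soon as it is found.
import Mathlib
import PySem

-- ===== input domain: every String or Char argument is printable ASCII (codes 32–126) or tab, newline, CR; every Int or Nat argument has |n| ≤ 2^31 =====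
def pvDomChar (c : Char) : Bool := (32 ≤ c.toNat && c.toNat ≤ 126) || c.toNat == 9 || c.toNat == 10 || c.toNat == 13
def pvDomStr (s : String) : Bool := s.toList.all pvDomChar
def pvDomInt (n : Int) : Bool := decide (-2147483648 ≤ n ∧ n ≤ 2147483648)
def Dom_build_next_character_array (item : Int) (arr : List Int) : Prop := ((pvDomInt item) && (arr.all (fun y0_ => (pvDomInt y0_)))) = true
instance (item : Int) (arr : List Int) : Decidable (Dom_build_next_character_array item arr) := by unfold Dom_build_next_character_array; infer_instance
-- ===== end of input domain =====

-- B replaces A's backward sweep (carrying the next occurrence while filling a preallocated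
-- array right-to-left) by a single forward pass that emits the answer in blocks; same cost, alternative structure.

-- ===== PORT A =====
def build_next_character_array (item : Int) (arr : List Int) : List (Option Int) :=
  -- next_index = None; result_arr = [None]*len(arr)
  -- for i in range(len(arr)-1, -1, -1): if arr[i]==item: next_index = i; result_arr[i] = next_index
  let s :=
    (PySem.List.pyRange ((arr.length : Int) - 1) (-1) (-1)).foldl
      (fun (s : Option Int × List (Option Int)) i =>
        let next_index := if PySem.List.pyGetD arr i 0 == item then some i else s.1
        (next_index, s.2.set i.toNat next_index))
      ((none : Option Int), List.replicate arr.length (none : Option Int))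
  s.2

-- ===== PORT B =====
def build_next_character_array_alt (item : Int) (arr : List Int) : List (Option Int) :=
  -- result = []; pending = 0
  -- for j, v in enumerate(arr): pending += 1; if v == item: result.extend([j]*pending); pending = 0
  -- result.extend([None]*pending)
  let s :=
    (PySem.List.enumerate arr).foldl
      (fun (s : List (Option Int) × Nat) jv =>
        let pending := s.2 + 1
        if jv.2 == item then (s.1 ++ List.replicate pending (some jv.1), 0)
        else (s.1, pending))
      (([] : List (Option Int)), 0)
  s.1 ++ List.replicate s.2 (none : Option Int)

-- ===== PRECONDITION & SPEC =====
def Spec_build_next_character_array (item : Int) (arr : List Int) (out : List (Option Int)) : Prop := out = build_next_character_array_alt item arr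
instance (item : Int) (arr : List Int) (out : List (Option Int)) : Decidable (Spec_build_next_character_array item arr out) := by unfold Spec_build_next_character_array; infer_instance

-- ===== CLAIM (what is proved, stated in full; the proofs are below) =====
def Claim_equal_build_next_character_array : Prop := ∀ (item : Int) (arr : List Int), Dom_build_next_character_array item arr → Spec_build_next_character_array item arr (build_next_character_array item arr)

-- ===== LEMMAS AND PROOFS =====

-- index (relative to offset k) of the first occurrence of item in xs, as an Option Int
def pvN (item : Int) (xs : List Int) (k : Int) : Option Int :=
  (xs.findIdx? (fun a => a == item)).map (fun t => k + (t : Int))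

-- the intended result for the suffix xs of the array, whose first element sits at absolute index k
def pvVals (item : Int) (xs : List Int) (k : Int) : List (Option Int) :=
  match xs with
  | [] => []
  | x :: t => (if x == item then some k else pvN item t (k + 1)) :: pvVals item t (k + 1)

lemma pvN_nil (item : Int) (k : Int) : pvN item [] k = none := rfl

lemma pvN_cons (item x : Int) (t : List Int) (k : Int) :
    pvN item (x :: t) k = if x == item then some k else pvN item t (k + 1) := by
  simp only [pvN, List.findIdx?_cons]
  by_cases h : x == item
  · simp [h]
  · cases hfi : t.findIdx? (fun a => a == item)
    · simp [h]
    · simp [h]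
      omega

lemma pvVals_cons (item x : Int) (t : List Int) (k : Int) :
    pvVals item (x :: t) k = pvN item (x :: t) k :: pvVals item t (k + 1) := by
  rw [pvN_cons]; rfl

lemma pvVals_eq_map (item : Int) (xs : List Int) (k : Int) :
    pvVals item xs k = (List.range xs.length).map (fun t => pvN item (xs.drop t) (k + (t : Int))) := by
  induction xs generalizing k with
  | nil => rfl
  | cons x t ih =>
    rw [pvVals_cons]
    simp only [List.length_cons, List.range_succ_eq_map, List.map_cons, List.map_map]
    congr 1
    · simp
    · rw [ih (k + 1)]
      apply List.map_congr_left
      intro u _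
      simp only [Function.comp_apply]
      congr 1
      push_cast
      ring

lemma pyRange_negOne_cons (j : Nat) :
    PySem.List.pyRange (j : Int) (-1) (-1) = (j : Int) :: PySem.List.pyRange ((j : Int) - 1) (-1) (-1) := by
  cases j with
  | zero => decide
  | succ j' =>
    simp only [PySem.List.pyRange]
    norm_num
    rw [if_pos (show (-1 : Int) < (j' : Int) from by omega)]
    rw [show ((j' : Int) + 1 + 1).toNat = j' + 2 from by omega]
    rw [show j' + 2 = (j' + 1) + 1 from rfl, List.range_succ_eq_map]
    simp only [List.map_cons, List.map_map]
    congr 1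
    all_goals simp

lemma foldB_spec (item : Int) (xs : List Int) (k : Int) (acc : List (Option Int)) (pending : Nat) :
    (let s :=
      (PySem.List.enumerate xs k).foldl
        (fun (s : List (Option Int) × Nat) jv =>
          let pending := s.2 + 1
          if jv.2 == item then (s.1 ++ List.replicate pending (some jv.1), 0)
          else (s.1, pending))
        (acc, pending)
     s.1 ++ List.replicate s.2 (none : Option Int))
    = acc ++ List.replicate pending (pvN item xs k) ++ pvVals item xs k := by
  induction xs generalizing k acc pending with
  | nil => simp [PySem.List.enumerate, pvN_nil, pvVals]
  | cons x t ih =>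
    have henum : PySem.List.enumerate (x :: t) k = (k, x) :: PySem.List.enumerate t (k + 1) := by
      simp [PySem.List.enumerate]
    simp only [henum, List.foldl_cons]
    by_cases h : x == item
    · simp only [h, if_pos]
      rw [ih (k + 1) (acc ++ List.replicate (pending + 1) (some k)) 0]
      rw [pvVals_cons, pvN_cons, if_pos h]
      simp [List.replicate_succ' (n := pending)]
    · simp only [h, if_neg, Bool.false_eq_true, not_false_iff]
      rw [ih (k + 1) acc (pending + 1)]
      rw [pvVals_cons, pvN_cons, if_neg (by simp_all)]
      simp [List.replicate_succ' (n := pending)]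

lemma alt_eq_pvVals (item : Int) (arr : List Int) :
    build_next_character_array_alt item arr = pvVals item arr 0 := by
  have h := foldB_spec item arr 0 [] 0
  simpa [build_next_character_array_alt] using h

lemma foldA_spec (item : Int) (arr : List Int) :
    ∀ (j : Nat), j ≤ arr.length → ∀ (res : List (Option Int)), res.length = arr.length →
    ((PySem.List.pyRange ((j : Int) - 1) (-1) (-1)).foldl
        (fun (s : Option Int × List (Option Int)) i =>
          let next_index := if PySem.List.pyGetD arr i 0 == item then some i else s.1
          (next_index, s.2.set i.toNat next_index))
        (pvN item (arr.drop j) (j : Int), res)).2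
    = (List.range j).map (fun t => pvN item (arr.drop t) (t : Int)) ++ res.drop j := by
  intro j
  induction j with
  | zero =>
    intro _ res _
    simp
  | succ j ih =>
    intro hj res hlen
    have hjlt : j < arr.length := by omega
    have hjres : j < res.length := by omega
    have hcast : ((j + 1 : Nat) : Int) - 1 = (j : Int) := by push_cast; ring
    rw [hcast, pyRange_negOne_cons j, List.foldl_cons]
    have hget : PySem.List.pyGetD arr ((j : Nat) : Int) 0 = arr[j]'hjlt := by
      rw [PySem.List.pyGetD_natCast]
      simp [List.getD_eq_getElem?_getD, hjlt]
    have hdropj : arr.drop j = arr[j]'hjlt :: arr.drop (j + 1) := List.drop_eq_getElem_cons hjlt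
    have hN : (if PySem.List.pyGetD arr ((j : Nat) : Int) 0 == item then some ((j : Nat) : Int)
                else pvN item (arr.drop (j + 1)) ((j + 1 : Nat) : Int))
              = pvN item (arr.drop j) (j : Int) := by
      rw [hget, hdropj, pvN_cons]
      by_cases h : arr[j]'hjlt == item <;> simp [h]
    simp only []
    rw [show (((j : Nat) : Int)).toNat = j from Int.toNat_natCast j]
    rw [hN]
    rw [ih (by omega) (res.set j (pvN item (arr.drop j) (j : Int))) (by simp [hlen])]
    have hdrop : (res.set j (pvN item (arr.drop j) (j : Int))).drop j
        = pvN item (arr.drop j) (j : Int) :: res.drop (j + 1) := by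
      rw [List.drop_set]
      simp only [lt_irrefl, Nat.sub_self]
      rw [List.drop_eq_getElem_cons hjres, List.set_cons_zero]
      simp
    rw [hdrop, List.range_succ, List.map_append]
    simp

lemma a_eq_pvVals (item : Int) (arr : List Int) :
    build_next_character_array item arr = pvVals item arr 0 := by
  have h := foldA_spec item arr arr.length (le_refl _) (List.replicate arr.length none) (by simp)
  rw [show pvN item (arr.drop arr.length) ((arr.length : Nat) : Int) = none from by simp [pvN_nil]] at h
  have h' : build_next_character_array item arr
      = (List.range arr.length).map (fun t => pvN item (arr.drop t) (t : Int))
        ++ (List.replicate arr.length (none : Option Int)).drop arr.length := h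
  rw [h', pvVals_eq_map item arr 0]
  simp

-- ===== VERDICT (by name: the statement is the Claim_ definition above) =====
theorem build_next_character_array_spec : Claim_equal_build_next_character_array := by
  intro item arr _
  unfold Spec_build_next_character_array
  rw [a_eq_pvVals, alt_eq_pvVals]
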